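-- pv_equiv track=rewrite | github.com/MrBrantCode/unitest_baseline | mut_generate/mist_train_cf/cf_22605/solution.py | find_smallest_common_index
-- ===== SOURCE A (Python) =====
-- def find_smallest_common_index(array1, array2):
--     smallest_common = None
--     common_index = -1
--
--     for i, num in enumerate(array1):
--         if num in array2:
--             if smallest_common is None or num < smallest_common:
--                 smallest_common = num
--                 common_index = i
--
--     return common_index
-- ===== SOURCE B (Python) =====
-- def find_smallest_common_index(array1, array2):
--     common = set(array1) & set(array2)
--     if not common:
--         return -1
--     return array1.index(min(common))
-- ===== Notes on version B (the rewrite author's own statement) =====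
-- stated objective: simpler
-- what changed: Replaces the single-pass running-minimum accumulator over enumerate with a set intersection, a min reduction over the common values, and a final array1.index lookup.
import Mathlib
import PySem

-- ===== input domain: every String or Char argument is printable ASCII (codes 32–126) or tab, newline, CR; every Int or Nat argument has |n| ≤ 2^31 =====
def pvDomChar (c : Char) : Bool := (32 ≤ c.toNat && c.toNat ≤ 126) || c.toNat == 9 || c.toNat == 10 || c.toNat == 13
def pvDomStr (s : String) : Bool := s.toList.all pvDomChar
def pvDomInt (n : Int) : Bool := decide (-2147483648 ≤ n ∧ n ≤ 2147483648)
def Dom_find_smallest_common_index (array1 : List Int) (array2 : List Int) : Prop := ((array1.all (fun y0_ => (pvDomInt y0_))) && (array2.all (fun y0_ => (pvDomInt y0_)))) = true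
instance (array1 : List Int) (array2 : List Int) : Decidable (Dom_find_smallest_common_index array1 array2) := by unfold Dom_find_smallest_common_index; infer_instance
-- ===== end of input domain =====

-- B replaces A's single-pass running-minimum accumulator by set-intersection, then min, then index (objective: simpler).

-- ===== PORT A =====
-- the enumerate loop with state (smallest_common, common_index)
def pvGoA (array2 : List Int) : List Int → Int → Option Int × Int → Option Int × Int
  | [], _, st => st
  | num :: rest, i, st =>
    if num ∈ array2 then
      match st.1 with
      | none => pvGoA array2 rest (i + 1) (some num, i)
      | some s =>
        if num < s then pvGoA array2 rest (i + 1) (some num, i)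
        else pvGoA array2 rest (i + 1) st
    else pvGoA array2 rest (i + 1) st

def find_smallest_common_index (array1 : List Int) (array2 : List Int) : Int :=
  (pvGoA array2 array1 0 (none, -1)).2

-- ===== PORT B =====
def find_smallest_common_index_alt (array1 : List Int) (array2 : List Int) : Int :=
  let common := PySem.Set.inter (PySem.Set.ofList array1) (PySem.Set.ofList array2)
  if common = [] then -1
  else
    match PySem.List.min? common (fun x => x) with
    | some m =>
      match PySem.List.index? array1 m with
      | some k => (k : Int)
      | none => -1   -- unreachable: min(common) ∈ array1, so array1.index cannot raise
    | none => -1     -- unreachable: common is nonempty here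

-- ===== PRECONDITION & SPEC =====
def Spec_find_smallest_common_index (array1 : List Int) (array2 : List Int) (out : Int) : Prop := out = find_smallest_common_index_alt array1 array2
instance (array1 : List Int) (array2 : List Int) (out : Int) : Decidable (Spec_find_smallest_common_index array1 array2 out) := by unfold Spec_find_smallest_common_index; infer_instance

-- ===== CLAIM (what is proved, stated in full; the proofs are below) =====
def Claim_equal_find_smallest_common_index : Prop := ∀ (array1 : List Int) (array2 : List Int), Dom_find_smallest_common_index array1 array2 → Spec_find_smallest_common_index array1 array2 (find_smallest_common_index array1 array2)

-- ===== LEMMAS AND PROOFS =====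

-- the common elements of array1, in array1 order (with duplicates)
def pvFilt (a2 xs : List Int) : List Int := xs.filter (fun x => decide (x ∈ a2))

-- minimum of a list, built from the right
def pvLmin : List Int → Option Int
  | [] => none
  | x :: xs => match pvLmin xs with | none => some x | some m => some (min x m)

theorem pvLmin_eq_none_iff (l : List Int) : pvLmin l = none ↔ l = [] := by
  cases l with
  | nil => simp [pvLmin]
  | cons x xs => simp [pvLmin]; cases pvLmin xs <;> simp

theorem pvLmin_mem {l : List Int} {m : Int} (h : pvLmin l = some m) : m ∈ l := by
  induction l generalizing m with
  | nil => simp [pvLmin] at h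
  | cons x xs ih =>
    simp only [pvLmin] at h
    cases hx : pvLmin xs with
    | none => rw [hx] at h; simp at h; simp [h]
    | some m' =>
      rw [hx] at h; simp at h
      rcases min_choice x m' with hc | hc
      · have : m = x := by omega
        simp [this]
      · right; rw [← h, hc]; exact ih hx

theorem pvLmin_le {l : List Int} {m : Int} (h : pvLmin l = some m) :
    ∀ x ∈ l, m ≤ x := by
  induction l generalizing m with
  | nil => simp [pvLmin] at h
  | cons x xs ih =>
    simp only [pvLmin] at h
    cases hx : pvLmin xs with
    | none =>
      rw [hx] at h; simp at h
      have : xs = [] := (pvLmin_eq_none_iff xs).1 hx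
      subst this; simp [h]
    | some m' =>
      rw [hx] at h; simp at h
      intro y hy
      rw [List.mem_cons] at hy
      rcases hy with hy | hy
      · subst hy; omega
      · have := ih hx y hy; omega

theorem pvGoA_spec (a2 : List Int) (xs : List Int) : ∀ (i : Int) (st : Option Int × Int),
    pvGoA a2 xs i st =
      match pvLmin (pvFilt a2 xs) with
      | none => st
      | some m =>
        match st.1 with
        | none => (some m, i + (xs.idxOf m : Int))
        | some s => if m < s then (some m, i + (xs.idxOf m : Int)) else st := by
  induction xs with
  | nil => intro i st; simp [pvGoA, pvFilt, pvLmin]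
  | cons num rest ih =>
    intro i st
    by_cases hmem : num ∈ a2
    · have hfilt : pvFilt a2 (num :: rest) = num :: pvFilt a2 rest := by
        simp [pvFilt, hmem]
      cases hst : st.1 with
      | none =>
        simp only [pvGoA, hmem, if_pos, hst]
        rw [ih, hfilt]
        simp only [pvLmin]
        cases hm : pvLmin (pvFilt a2 rest) with
        | none => simp [List.idxOf_cons_self]
        | some m' =>
          simp only
          by_cases hlt : m' < num
          · have hne : num ≠ m' := by omega
            rw [if_pos hlt]
            have : min num m' = m' := by omega
            rw [this]
            rw [List.idxOf_cons_ne _ (by exact_mod_cast hne)]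
            simp only [Prod.mk.injEq, Nat.succ_eq_add_one]
            refine ⟨trivial, by push_cast; ring⟩
          · rw [if_neg hlt]
            have : min num m' = num := by omega
            rw [this]
            simp [List.idxOf_cons_self]
      | some s =>
        by_cases hlt : num < s
        · simp only [pvGoA, hmem, if_pos, hst, if_pos hlt]
          rw [ih, hfilt]
          simp only [pvLmin]
          cases hm : pvLmin (pvFilt a2 rest) with
          | none =>
            simp [hlt, List.idxOf_cons_self]
          | some m' =>
            simp only
            by_cases h2 : m' < num
            · have hmin : min num m' = m' := by omega
              have hms : m' < s := by omega
              rw [if_pos h2, hmin, if_pos hms]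
              have hne : num ≠ m' := by omega
              rw [List.idxOf_cons_ne _ (by exact_mod_cast hne)]
              simp only [Prod.mk.injEq, Nat.succ_eq_add_one]
              refine ⟨trivial, by push_cast; ring⟩
            · have hmin : min num m' = num := by omega
              rw [if_neg h2, hmin, if_pos hlt]
              simp [List.idxOf_cons_self]
        · simp only [pvGoA, hmem, if_pos, hst, if_neg hlt]
          rw [ih, hfilt]
          simp only [pvLmin]
          cases hm : pvLmin (pvFilt a2 rest) with
          | none =>
            simp [hlt]
          | some m' =>
            simp only [hst]
            by_cases h2 : m' < s
            · have h3 : m' < num := by omega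
              have hmin : min num m' = m' := by omega
              rw [if_pos h2, hmin, if_pos h2]
              have hne : num ≠ m' := by omega
              rw [List.idxOf_cons_ne _ (by exact_mod_cast hne)]
              simp only [Prod.mk.injEq, Nat.succ_eq_add_one]
              refine ⟨trivial, by push_cast; ring⟩
            · rw [if_neg h2]
              by_cases h3 : m' < num
              · have hmin : min num m' = m' := by omega
                rw [hmin, if_neg h2]
              · have hmin : min num m' = num := by omega
                rw [hmin, if_neg (by omega)]
    · have hfilt : pvFilt a2 (num :: rest) = pvFilt a2 rest := by
        simp [pvFilt, hmem]
      simp only [pvGoA, hmem, if_false]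
      rw [ih, hfilt]
      cases hm : pvLmin (pvFilt a2 rest) with
      | none => simp
      | some m' =>
        have hm'2 : m' ∈ a2 := by
          have := pvLmin_mem hm
          simp [pvFilt] at this
          exact this.2
        have hne : num ≠ m' := fun h => hmem (h ▸ hm'2)
        cases hst : st.1 with
        | none =>
          simp only
          rw [List.idxOf_cons_ne _ (by exact_mod_cast hne)]
          simp only [Prod.mk.injEq, Nat.succ_eq_add_one]
          refine ⟨trivial, by push_cast; ring⟩
        | some s =>
          simp only
          by_cases h2 : m' < s
          · rw [if_pos h2, if_pos h2]
            rw [List.idxOf_cons_ne _ (by exact_mod_cast hne)]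
            simp only [Prod.mk.injEq, Nat.succ_eq_add_one]
            refine ⟨trivial, by push_cast; ring⟩
          · rw [if_neg h2, if_neg h2]

theorem pv_index?_of_mem {xs : List Int} {m : Int} (h : m ∈ xs) :
    PySem.List.index? xs m = some (xs.idxOf m) := by
  rw [PySem.List.index?_eq_idxOf?]
  induction xs with
  | nil => simp at h
  | cons x rest ih =>
    by_cases hx : x = m
    · subst hx; simp [List.idxOf?_cons]
    · have hm : m ∈ rest := by
        rcases (List.mem_cons).1 h with h1 | h1
        · exact absurd h1.symm hx
        · exact h1
      simp [List.idxOf?_cons, hx, ih hm]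

-- ===== VERDICT (by name: the statement is the Claim_ definition above) =====
theorem find_smallest_common_index_spec : Claim_equal_find_smallest_common_index := by
  intro a1 a2 _
  unfold Spec_find_smallest_common_index find_smallest_common_index find_smallest_common_index_alt
  rw [pvGoA_spec]
  cases hm : pvLmin (pvFilt a2 a1) with
  | none =>
    have hempty : pvFilt a2 a1 = [] := (pvLmin_eq_none_iff _).1 hm
    have hcom : PySem.Set.inter (PySem.Set.ofList a1) (PySem.Set.ofList a2) = [] := by
      rw [List.eq_nil_iff_forall_not_mem]
      intro x hx
      rw [PySem.Set.mem_inter, PySem.Set.mem_ofList, PySem.Set.mem_ofList] at hx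
      have : x ∈ pvFilt a2 a1 := by simp [pvFilt, hx.1, hx.2]
      rw [hempty] at this; simp at this
    simp [hcom]
  | some m =>
    have hmimem : m ∈ pvFilt a2 a1 := pvLmin_mem hm
    have hm1 : m ∈ a1 := by simp [pvFilt] at hmimem; exact hmimem.1
    have hm2 : m ∈ a2 := by simp [pvFilt] at hmimem; exact hmimem.2
    have hmcom : m ∈ PySem.Set.inter (PySem.Set.ofList a1) (PySem.Set.ofList a2) := by
      rw [PySem.Set.mem_inter, PySem.Set.mem_ofList, PySem.Set.mem_ofList]
      exact ⟨hm1, hm2⟩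
    have hne : PySem.Set.inter (PySem.Set.ofList a1) (PySem.Set.ofList a2) ≠ [] := by
      intro h; rw [h] at hmcom; simp at hmcom
    simp only [if_neg hne]
    cases hmin : PySem.List.min? (PySem.Set.inter (PySem.Set.ofList a1) (PySem.Set.ofList a2)) (fun x => x) with
    | none =>
      exact absurd (((PySem.List.min?_eq_none_iff _ _).1 hmin)) hne
    | some m2 =>
      have hm2mem : m2 ∈ PySem.Set.inter (PySem.Set.ofList a1) (PySem.Set.ofList a2) :=
        PySem.List.min?_mem hmin
      have hm2filt : m2 ∈ pvFilt a2 a1 := by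
        rw [PySem.Set.mem_inter, PySem.Set.mem_ofList, PySem.Set.mem_ofList] at hm2mem
        simp [pvFilt, hm2mem.1, hm2mem.2]
      have h1 : m ≤ m2 := pvLmin_le hm _ hm2filt
      have h2 : m2 ≤ m := PySem.List.min?_isMin hmin _ hmcom
      have heq : m2 = m := le_antisymm h2 h1
      subst heq
      have hidx := pv_index?_of_mem hm1
      rw [PySem.List.index?_eq_idxOf?] at hidx
      simp [hidx]
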